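-- pv_equiv track=rewrite | github.com/lohith2/Intelligent-Research-Architect | app/scholarly_search.py | format_reading_path
-- ===== SOURCE A (Python) =====
-- from typing import Any, Dict, List, Optional
--
-- def format_reading_path(sources: List[Dict[str, str]]) -> str:
--     if not sources:
--         return ""
--
--     sorted_by_citations = sorted(sources, key=lambda item: item.get("citation_count", 0) or 0, reverse=True)
--     sorted_by_year = sorted(
--         sources,
--         key=lambda item: (int(item.get("year")) if str(item.get("year", "")).isdigit() else 0),
--         reverse=True,
--     )
--     surveys = [source for source in sources if source.get("paper_role") == "survey"]
--     benchmarks = [source for source in sources if source.get("paper_role") == "benchmark"]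
--     methods = [source for source in sources if source.get("paper_role") == "method"]
--
--     lines = ["Reading Path:"]
--     if sorted_by_citations:
--         seminal = sorted_by_citations[0]
--         lines.append(
--             f"- Seminal anchor: {seminal.get('title', 'Unknown')} ({seminal.get('year', 'n.d.')})"
--         )
--     for source in surveys[:1]:
--         lines.append(
--             f"- Survey first: {source.get('title', 'Unknown')} ({source.get('year', 'n.d.')})"
--         )
--     for source in benchmarks[:1]:
--         lines.append(
--             f"- Benchmark next: {source.get('title', 'Unknown')} ({source.get('year', 'n.d.')})"
--         )
--     for source in methods[:1]:
--         lines.append(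
--             f"- Method focus: {source.get('title', 'Unknown')} ({source.get('year', 'n.d.')})"
--         )
--     for source in sorted_by_year[:2]:
--         lines.append(
--             f"- Current frontier: {source.get('title', 'Unknown')} ({source.get('year', 'n.d.')})"
--         )
--     return "\n".join(lines)
-- ===== SOURCE B (Python) =====
-- def format_reading_path(sources):
--     if not sources:
--         return ""
--
--     best_key = None
--     best = None
--     first_survey = first_benchmark = first_method = None
--     top2 = []  # up to two (year_key, item) pairs, best years first, earlier index wins ties
--
--     for item in sources:
--         ck = item.get("citation_count", 0) or 0
--         if best is None or ck > best_key:
--             best_key, best = ck, item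
--
--         role = item.get("paper_role")
--         if role == "survey" and first_survey is None:
--             first_survey = item
--         if role == "benchmark" and first_benchmark is None:
--             first_benchmark = item
--         if role == "method" and first_method is None:
--             first_method = item
--
--         y = item.get("year", "")
--         yk = int(y) if str(y).isdigit() else 0
--         if len(top2) < 2:
--             if top2 and yk > top2[0][0]:
--                 top2.insert(0, (yk, item))
--             else:
--                 top2.append((yk, item))
--         elif yk > top2[0][0]:
--             top2 = [(yk, item), top2[0]]
--         elif yk > top2[1][0]:
--             top2 = [top2[0], (yk, item)]
--
--     def line(tag, it):
--         return f"- {tag}: {it.get('title', 'Unknown')} ({it.get('year', 'n.d.')})"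
--
--     lines = ["Reading Path:", line("Seminal anchor", best)]
--     if first_survey is not None:
--         lines.append(line("Survey first", first_survey))
--     if first_benchmark is not None:
--         lines.append(line("Benchmark next", first_benchmark))
--     if first_method is not None:
--         lines.append(line("Method focus", first_method))
--     for _, it in top2:
--         lines.append(line("Current frontier", it))
--     return "\n".join(lines)
-- ===== Notes on version B (the rewrite author's own statement) =====
-- stated objective: alternative
-- what changed: Replaces A's two full stable sorts and three whole-list filters by one linear pass that maintains the first maximum-citation item, the first item of each role, and the top two items by year (strict-greater insertion reproduces the stable reverse sort's earliest-index tie-break).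
import Mathlib
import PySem

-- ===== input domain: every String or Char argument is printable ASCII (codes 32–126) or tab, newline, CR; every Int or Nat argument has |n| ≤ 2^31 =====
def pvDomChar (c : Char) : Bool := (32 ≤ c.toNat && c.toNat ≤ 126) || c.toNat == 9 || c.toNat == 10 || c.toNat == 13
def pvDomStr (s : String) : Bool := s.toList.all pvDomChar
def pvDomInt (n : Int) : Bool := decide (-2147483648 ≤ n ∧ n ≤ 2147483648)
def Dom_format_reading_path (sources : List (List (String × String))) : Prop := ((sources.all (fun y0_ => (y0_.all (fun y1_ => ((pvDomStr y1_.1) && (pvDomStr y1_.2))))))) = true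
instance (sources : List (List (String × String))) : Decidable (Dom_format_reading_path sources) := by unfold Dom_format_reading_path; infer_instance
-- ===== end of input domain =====

-- B replaces A's two full sorts and three list filters by ONE linear pass that keeps the
-- first maximum-citation item, the first item of each role, and the top two items by year.

-- shared helpers (the same Python expressions occur verbatim in A and in B):
-- `item.get("citation_count", 0) or 0`: a missing key or an empty value is Python's falsy
-- int 0; under Pre_ all keys in one call are of one type, and "" plays 0's role exactly
-- (it compares equal to itself, and every non-empty string compares the same way against "").
def pvCiteKey (item : List (String × String)) : String :=
  (PySem.Dict.ofList item).getD "citation_count" ""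

-- `int(item.get("year")) if str(item.get("year", "")).isdigit() else 0`; on a digit-only
-- string PySem.Int.ofStr? always returns some, so the `.getD 0` fallback is never taken
def pvYearKey (item : List (String × String)) : Int :=
  let y := (PySem.Dict.ofList item).getD "year" ""
  if PySem.Str.strIsdigit y then (PySem.Int.ofStr? y).getD 0 else 0

-- `f"- {tag}: {item.get('title', 'Unknown')} ({item.get('year', 'n.d.')})"`
def pvLine (tag : String) (item : List (String × String)) : String :=
  "- " ++ tag ++ ": " ++ (PySem.Dict.ofList item).getD "title" "Unknown" ++ " (" ++
    (PySem.Dict.ofList item).getD "year" "n.d." ++ ")"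

def pvRole (item : List (String × String)) : Option String :=
  (PySem.Dict.ofList item).get? "paper_role"

-- ===== PORT A =====
def format_reading_path (sources : List (List (String × String))) : String :=
  match sources with
  | [] => ""
  | _ :: _ =>
    let sorted_by_citations := PySem.List.sorted sources pvCiteKey true
    let sorted_by_year := PySem.List.sorted sources pvYearKey true
    let surveys := sources.filter (fun s => pvRole s == some "survey")
    let benchmarks := sources.filter (fun s => pvRole s == some "benchmark")
    let methods := sources.filter (fun s => pvRole s == some "method")
    let lines := ["Reading Path:"]
    let lines := match sorted_by_citations with
      | [] => lines
      | seminal :: _ => lines ++ [pvLine "Seminal anchor" seminal]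
    let lines := (PySem.List.slice surveys none (some 1)).foldl
      (fun acc s => acc ++ [pvLine "Survey first" s]) lines
    let lines := (PySem.List.slice benchmarks none (some 1)).foldl
      (fun acc s => acc ++ [pvLine "Benchmark next" s]) lines
    let lines := (PySem.List.slice methods none (some 1)).foldl
      (fun acc s => acc ++ [pvLine "Method focus" s]) lines
    let lines := (PySem.List.slice sorted_by_year none (some 2)).foldl
      (fun acc s => acc ++ [pvLine "Current frontier" s]) lines
    PySem.Str.join "\n" lines

-- ===== PORT B =====
-- `if best is None or ck > best_key: best_key, best = ck, item` (best_key, best kept as one Option)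
def pvBestStep (acc : Option (String × List (String × String))) (item : List (String × String)) :
    Option (String × List (String × String)) :=
  let ck := pvCiteKey item
  match acc with
  | none => some (ck, item)
  | some (bk, bi) => if bk < ck then some (ck, item) else some (bk, bi)

-- `if role == r and first_r is None: first_r = item`
def pvFirstStep (r : String) (acc : Option (List (String × String)))
    (item : List (String × String)) : Option (List (String × String)) :=
  if pvRole item == some r && acc.isNone then some item else acc

-- the top2 update: insert by strictly-greater year, keep at most two entries
def pvTop2Step (acc : List (Int × List (String × String))) (item : List (String × String)) :
    List (Int × List (String × String)) :=
  let yk := pvYearKey item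
  match acc with
  | [] => [(yk, item)]
  | [a] => if a.1 < yk then [(yk, item), a] else [a, (yk, item)]
  | a :: b :: _ =>
    if a.1 < yk then [(yk, item), a]
    else if b.1 < yk then [a, (yk, item)]
    else [a, b]

-- the body of B's single `for item in sources` loop: all five accumulators at once
def pvStep
    (s : Option (String × List (String × String)) × Option (List (String × String)) ×
         Option (List (String × String)) × Option (List (String × String)) ×
         List (Int × List (String × String)))
    (item : List (String × String)) :
    Option (String × List (String × String)) × Option (List (String × String)) ×
    Option (List (String × String)) × Option (List (String × String)) ×
    List (Int × List (String × String)) :=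
  (pvBestStep s.1 item, pvFirstStep "survey" s.2.1 item, pvFirstStep "benchmark" s.2.2.1 item,
    pvFirstStep "method" s.2.2.2.1 item, pvTop2Step s.2.2.2.2 item)

def format_reading_path_alt (sources : List (List (String × String))) : String :=
  match sources with
  | [] => ""
  | _ :: _ =>
    let st := sources.foldl pvStep (none, none, none, none, [])
    -- `best` is never None here since sources is non-empty; [] below is unreachable
    let lines := ["Reading Path:"] ++
      (match st.1 with | some (_, b) => [pvLine "Seminal anchor" b] | none => [])
    let lines := lines ++
      (match st.2.1 with | some s => [pvLine "Survey first" s] | none => [])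
    let lines := lines ++
      (match st.2.2.1 with | some s => [pvLine "Benchmark next" s] | none => [])
    let lines := lines ++
      (match st.2.2.2.1 with | some s => [pvLine "Method focus" s] | none => [])
    let lines := lines ++ st.2.2.2.2.map (fun p => pvLine "Current frontier" p.2)
    PySem.Str.join "\n" lines

-- ===== PRECONDITION & SPEC =====
-- Pre_ excludes exactly the inputs on which Python A raises a TypeError: when some items have
-- a truthy (non-empty) citation_count string and others fall back to the int 0, the citation
-- sort compares str with int and raises; Pre_ demands the citation keys be all falsy or all truthy.
def Pre_format_reading_path (sources : List (List (String × String))) : Prop :=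
  (∀ item ∈ sources, pvCiteKey item = "") ∨ (∀ item ∈ sources, pvCiteKey item ≠ "")
instance (sources : List (List (String × String))) : Decidable (Pre_format_reading_path sources) := by
  unfold Pre_format_reading_path; infer_instance

def pvWitness_format_reading_path : (List (List (String × String))) :=
  [[("title", "Attention Is All You Need"), ("year", "2017"), ("citation_count", "90000"),
    ("paper_role", "method")],
   [("title", "A Survey"), ("year", "2021"), ("citation_count", "12"), ("paper_role", "survey")]]

def Spec_format_reading_path (sources : List (List (String × String))) (out : String) : Prop := out = format_reading_path_alt sources
instance (sources : List (List (String × String))) (out : String) : Decidable (Spec_format_reading_path sources out) := by unfold Spec_format_reading_path; infer_instance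

-- ===== CLAIM (what is proved, stated in full; the proofs are below) =====
def Claim_equal_format_reading_path : Prop := ∀ (sources : List (List (String × String))), Dom_format_reading_path sources → Pre_format_reading_path sources → Spec_format_reading_path sources (format_reading_path sources)

-- ===== LEMMAS AND PROOFS =====

-- taking the first n of an insertion is decided by the first n of the target list
theorem pv_take_insertBy {α : Type} (before : α → α → Bool) (x : α) (l : List α) (n : Nat) :
    (PySem.List.insertBy before x l).take n = (PySem.List.insertBy before x (l.take n)).take n := by
  induction l generalizing n with
  | nil => simp
  | cons y ys ih =>
    cases n with
    | zero => simp
    | succ m =>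
      simp only [List.take_succ_cons, PySem.List.insertBy]
      cases hxy : before x y with
      | true =>
        simp only [if_true, List.take_succ_cons]
        refine congrArg (x :: ·) ?_
        cases m with
        | zero => rfl
        | succ k =>
          simp [List.take_take]
      | false =>
        simp only [Bool.false_eq_true, if_false, List.take_succ_cons]
        exact congrArg (y :: ·) (ih m)

theorem pv_foldl_insertBy_take {α : Type} (before : α → α → Bool) (n : Nat) (xs : List α)
    (init : List α) :
    (xs.foldl (fun acc x => PySem.List.insertBy before x acc) init).take n =
      xs.foldl (fun acc x => (PySem.List.insertBy before x acc).take n) (init.take n) := by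
  induction xs generalizing init with
  | nil => rfl
  | cons y ys ih =>
    simp only [List.foldl_cons]
    rw [ih, ← pv_take_insertBy]

-- B's top2 step is "insert by year, keep two" applied to a ≤2-element list
theorem pv_top2_fold (xs : List (List (String × String)))
    (acc : List (List (String × String))) (h : acc.length ≤ 2) :
    xs.foldl pvTop2Step (acc.map (fun i => (pvYearKey i, i))) =
      (xs.foldl (fun a x =>
        (PySem.List.insertBy (fun a b => decide (pvYearKey b < pvYearKey a)) x a).take 2) acc).map
        (fun i => (pvYearKey i, i)) := by
  induction xs generalizing acc with
  | nil => rfl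
  | cons y ys ih =>
    simp only [List.foldl_cons]
    have hstep : pvTop2Step (acc.map (fun i => (pvYearKey i, i))) y =
        (((PySem.List.insertBy (fun a b => decide (pvYearKey b < pvYearKey a)) y acc).take 2).map
          (fun i => (pvYearKey i, i))) := by
      rcases acc with _ | ⟨a, _ | ⟨b, _ | ⟨c, t⟩⟩⟩
      · rfl
      · simp only [pvTop2Step, PySem.List.insertBy, List.map]
        by_cases hy : pvYearKey a < pvYearKey y
        · simp [hy]
        · simp [hy]
      · simp only [pvTop2Step, PySem.List.insertBy, List.map]
        by_cases hy : pvYearKey a < pvYearKey y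
        · simp [hy]
        · by_cases hb : pvYearKey b < pvYearKey y
          · simp [hy, hb]
          · simp [hy, hb]
      · simp at h
    rw [hstep]
    exact ih _ (by simp)

-- B's best step is "insert by citation key, keep one" applied to a ≤1-element list (as an Option)
theorem pv_best_fold (xs : List (List (String × String)))
    (acc : List (List (String × String))) (h : acc.length ≤ 1) :
    xs.foldl pvBestStep ((acc.head?).map (fun i => (pvCiteKey i, i))) =
      ((xs.foldl (fun a x =>
        (PySem.List.insertBy (fun a b => decide (pvCiteKey b < pvCiteKey a)) x a).take 1) acc).head?).map
        (fun i => (pvCiteKey i, i)) := by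
  induction xs generalizing acc with
  | nil => rfl
  | cons y ys ih =>
    simp only [List.foldl_cons]
    have hstep : pvBestStep ((acc.head?).map (fun i => (pvCiteKey i, i))) y =
        ((((PySem.List.insertBy (fun a b => decide (pvCiteKey b < pvCiteKey a)) y acc).take 1).head?).map
          (fun i => (pvCiteKey i, i))) := by
      rcases acc with _ | ⟨a, _ | ⟨b, t⟩⟩
      · rfl
      · simp only [pvBestStep, PySem.List.insertBy, List.head?, Option.map]
        by_cases hy : pvCiteKey a < pvCiteKey y
        · simp [hy]
        · simp [hy]
      · simp at h
    rw [hstep]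
    exact ih _ (by simp)

-- B's first-role fold returns the head of A's filter
theorem pv_first_fold (r : String) (xs : List (List (String × String)))
    (acc : Option (List (String × String))) :
    xs.foldl (pvFirstStep r) acc =
      (match acc with
       | some a => some a
       | none => (xs.filter (fun s => pvRole s == some r)).head?) := by
  induction xs generalizing acc with
  | nil => cases acc <;> rfl
  | cons y ys ih =>
    cases acc with
    | some a =>
      have hs : pvFirstStep r (some a) y = some a := by simp [pvFirstStep]
      simp only [List.foldl_cons, hs, ih]
    | none =>
      simp only [List.foldl_cons, List.filter_cons]
      by_cases hp : (pvRole y == some r) = true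
      · simp [pvFirstStep, hp, ih]
      · simp [pvFirstStep, hp, ih]

-- the fold of B's loop body is the five independent folds
theorem pv_step_split (xs : List (List (String × String)))
    (s0 : Option (String × List (String × String)) × Option (List (String × String)) ×
      Option (List (String × String)) × Option (List (String × String)) ×
      List (Int × List (String × String))) :
    xs.foldl pvStep s0 =
      (xs.foldl pvBestStep s0.1, xs.foldl (pvFirstStep "survey") s0.2.1,
        xs.foldl (pvFirstStep "benchmark") s0.2.2.1, xs.foldl (pvFirstStep "method") s0.2.2.2.1,
        xs.foldl pvTop2Step s0.2.2.2.2) := by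
  induction xs generalizing s0 with
  | nil => rfl
  | cons y ys ih => simp only [List.foldl_cons]; rw [ih]; rfl

-- (l.take 1).map f as an option match; lines up the two ways the lines lists are built
theorem pv_take1_map {α β : Type} (l : List α) (f : α → β) :
    (l.take 1).map f = (match l.head? with | some a => [f a] | none => []) := by
  cases l <;> rfl

-- ===== VERDICT (by name: the statement is the Claim_ definition above) =====
set_option maxHeartbeats 1000000 in
theorem format_reading_path_spec : Claim_equal_format_reading_path := by
  intro sources _ _
  unfold Spec_format_reading_path
  cases sources with
  | nil => rfl
  | cons h t =>
    unfold format_reading_path format_reading_path_alt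
    simp only [pv_step_split]
    have hne : PySem.List.sorted (h :: t) pvCiteKey true ≠ [] := by
      simp [PySem.List.sorted_eq_nil_iff]
    obtain ⟨s0, srest, hs⟩ := List.exists_cons_of_ne_nil hne
    have hb1 : List.foldl (fun acc x =>
        (PySem.List.insertBy (fun a b => decide (pvCiteKey b < pvCiteKey a)) x acc).take 1) [] (h :: t) =
        (List.foldl (fun acc x =>
          PySem.List.insertBy (fun a b => decide (pvCiteKey b < pvCiteKey a)) x acc) [] (h :: t)).take 1 := by
      simpa using (pv_foldl_insertBy_take (fun a b => decide (pvCiteKey b < pvCiteKey a)) 1 (h :: t) []).symm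
    have hbest : List.foldl pvBestStep none (h :: t) = some (pvCiteKey s0, s0) := by
      have h0 := pv_best_fold (h :: t) [] (by simp)
      simp only [List.head?_nil, Option.map_none] at h0
      rw [h0, hb1, ← PySem.List.sorted_rev_eq_foldl_insertBy, hs]
      rfl
    have ht1 : List.foldl (fun acc x =>
        (PySem.List.insertBy (fun a b => decide (pvYearKey b < pvYearKey a)) x acc).take 2) [] (h :: t) =
        (List.foldl (fun acc x =>
          PySem.List.insertBy (fun a b => decide (pvYearKey b < pvYearKey a)) x acc) [] (h :: t)).take 2 := by
      simpa using (pv_foldl_insertBy_take (fun a b => decide (pvYearKey b < pvYearKey a)) 2 (h :: t) []).symm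
    have htop2 : List.foldl pvTop2Step [] (h :: t) =
        ((PySem.List.sorted (h :: t) pvYearKey true).take 2).map (fun i => (pvYearKey i, i)) := by
      have h0 := pv_top2_fold (h :: t) [] (by simp)
      simp only [List.map_nil] at h0
      rw [h0, ht1, ← PySem.List.sorted_rev_eq_foldl_insertBy]
    rw [hs, hbest, htop2]
    simp only [pv_first_fold]
    rw [PySem.List.slice_to _ (by norm_num : (0:Int) ≤ 1),
        PySem.List.slice_to _ (by norm_num : (0:Int) ≤ 1),
        PySem.List.slice_to _ (by norm_num : (0:Int) ≤ 1),
        PySem.List.slice_to _ (by norm_num : (0:Int) ≤ 2)]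
    simp only [PySem.List.foldl_append_singleton_eq_map, pv_take1_map, List.map_map,
      List.append_assoc, Int.toNat_one]
    simp only [Function.comp_def]
    rw [show Int.toNat 2 = 2 from rfl,
        show (fun x => pvLine "Current frontier" x) = pvLine "Current frontier" from rfl]
    cases (List.filter (fun s => pvRole s == some "survey") (h :: t)).head? <;>
      cases (List.filter (fun s => pvRole s == some "benchmark") (h :: t)).head? <;>
        cases (List.filter (fun s => pvRole s == some "method") (h :: t)).head? <;> rfl
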